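-- pv_equiv track=rewrite | github.com/Panchajanya1999/Programmings | GFG-POTD/2023/November/15-11-23/POTD_better-string.py | betterString
-- ===== SOURCE A (Python) =====
-- def betterString(str1, str2):
--     # Code here
--
--     # function to return the number of distinct
--     # subsequences of str
--     def countSub(s):
--         # create an array to store index
--         # of last
--         last = [-1] * 256
--
--         # length of input string
--         n = len(s)
--
--         # dp[i] is going to store count of distinct
--         # subsequences of length i.
--         dp = [0] * (n + 1)
--
--         # Empty substring has only one subsequence
--         dp[0] = 1
--
--         # Traverse through all lengths from 1 to n.
--         for i in range(1, n + 1):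
--             # Number of subsequences with substring
--             # str[0..i-1]
--             dp[i] = (2 * dp[i - 1])
--
--             # If current character has appeared
--             # before, then remove all subsequences
--             # ending with previous occurrence.
--             if (last[ord(s[i - 1])] != -1):
--                 dp[i] = (dp[i] - dp[last[ord(s[i - 1])]])
--
--                 # Mark occurrence of current character
--             last[ord(s[i - 1])] = (i - 1)
--
--                 # +1 is for empty subsequence
--         return dp[n] + 1
--
--     return str1 if countSub(str1) == countSub(str2) else str1 if countSub(str1) > countSub(str2) else str2
-- ===== SOURCE B (Python) =====
-- def betterString(str1, str2):
--     # Distinct-subsequence count via the "ends-with" DP: ends[c] = number of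
--     # distinct non-empty subsequences ending in character c; appending c gives
--     # every old subsequence (and the empty one) extended by c, so
--     # ends[c] = 1 + sum(ends.values()).  No doubling/subtraction recurrence,
--     # no dp array, no last-occurrence index table.
--     def countSub(s):
--         ends = {}
--         for c in s:
--             ends[c] = 1 + sum(ends.values())
--         return sum(ends.values())
--     return str1 if countSub(str1) >= countSub(str2) else str2
-- ===== Notes on version B (the rewrite author's own statement) =====
-- stated objective: alternative
-- what changed: countSub is replaced by the ends-with DP: a dict ends[c] = number of distinct non-empty subsequences ending in c, updated additively as ends[c] = 1 + sum(ends.values()) and summed at the end, instead of A's forward dp array with the 2*dp[i-1] - dp[last] doubling/subtraction recurrence and a 256-entry last-index table; the final triple comparison collapses to one >= (the common +2 offset cancels).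
import Mathlib
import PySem

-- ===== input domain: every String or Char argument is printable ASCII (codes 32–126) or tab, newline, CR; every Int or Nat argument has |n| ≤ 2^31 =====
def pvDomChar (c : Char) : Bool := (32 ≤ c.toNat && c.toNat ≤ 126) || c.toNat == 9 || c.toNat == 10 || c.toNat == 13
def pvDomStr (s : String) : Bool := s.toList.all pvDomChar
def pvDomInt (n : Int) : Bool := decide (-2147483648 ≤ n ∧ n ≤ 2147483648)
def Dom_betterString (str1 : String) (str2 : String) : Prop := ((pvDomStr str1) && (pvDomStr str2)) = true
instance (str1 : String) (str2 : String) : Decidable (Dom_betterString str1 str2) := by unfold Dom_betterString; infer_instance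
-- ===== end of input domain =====

-- B counts distinct subsequences by the additive "ends-with" DP (ends[c] = 1 + sum of the
-- table, summed at the end) instead of A's doubling/subtraction dp array with a 256-entry
-- last-index table; an alternative algorithm of similar cost, not claimed faster.

-- ===== PORT A =====
-- loop body of A's `for i in range(1, n+1)`; indices i-1, i and the dp index read back
-- are always in range, so the total pyGetD/pySetD forms are exact here
def stepA (s : String) (st : List Int × List Int) (i : Int) : List Int × List Int :=
  let dp := st.1
  let last := st.2
  -- dp[i] = 2 * dp[i-1]
  let dp := PySem.List.pySetD dp i (2 * PySem.List.pyGetD dp (i - 1) 0)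
  -- ord(s[i-1]); the string index is always in range in the loop
  let c : Int := (((PySem.Str.pyGet? s (i - 1)).getD ' ').toNat : Int)
  -- if last[ord(s[i-1])] != -1: dp[i] = dp[i] - dp[last[ord(s[i-1])]]
  let dp := if PySem.List.pyGetD last c (-1) ≠ -1 then
      PySem.List.pySetD dp i (PySem.List.pyGetD dp i 0 - PySem.List.pyGetD dp (PySem.List.pyGetD last c (-1)) 0)
    else dp
  -- last[ord(s[i-1])] = i - 1
  let last := PySem.List.pySetD last c (i - 1)
  (dp, last)

def countSubA (s : String) : Int :=
  let last : List Int := List.replicate 256 (-1)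
  let n : Int := PySem.Str.len s
  let dp : List Int := List.replicate (n + 1).toNat 0
  let dp := PySem.List.pySetD dp 0 1
  let st := (PySem.List.pyRange 1 (n + 1) 1).foldl (stepA s) (dp, last)
  PySem.List.pyGetD st.1 n 0 + 1

def betterString (str1 : String) (str2 : String) : String :=
  if countSubA str1 == countSubA str2 then str1
  else if countSubA str1 > countSubA str2 then str1 else str2

-- ===== PORT B =====
-- ends[c] = 1 + sum(ends.values())
def stepB (d : PySem.Dict Char Int) (c : Char) : PySem.Dict Char Int :=
  d.insert c (1 + d.values.sum)

-- return sum(ends.values())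
def countSubB (s : String) : Int :=
  (s.toList.foldl stepB PySem.Dict.empty).values.sum

def betterString_alt (str1 : String) (str2 : String) : String :=
  if countSubB str1 ≥ countSubB str2 then str1 else str2

-- ===== PRECONDITION & SPEC =====
def Spec_betterString (str1 : String) (str2 : String) (out : String) : Prop := out = betterString_alt str1 str2
instance (str1 : String) (str2 : String) (out : String) : Decidable (Spec_betterString str1 str2 out) := by unfold Spec_betterString; infer_instance

-- ===== CLAIM (what is proved, stated in full; the proofs are below) =====
def Claim_equal_betterString : Prop := ∀ (str1 : String) (str2 : String), Dom_betterString str1 str2 → Spec_betterString str1 str2 (betterString str1 str2)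

-- ===== LEMMAS AND PROOFS =====

def Ainit (s : String) : List Int × List Int :=
  ((List.replicate (s.toList.length + 1) 0).set 0 1, List.replicate 256 (-1))

theorem getD_set_self' (l : List Int) (k : Nat) (v d : Int) (h : k < l.length) :
    (l.set k v).getD k d = v := by
  simp [List.getD, List.getElem?_set_self h]

theorem getD_set_ne' (l : List Int) (k m : Nat) (v d : Int) (h : k ≠ m) :
    (l.set k v).getD m d = l.getD m d := by
  simp [List.getD, List.getElem?_set_ne h]

-- sum of second components after an overwrite of the unique pair keyed k
theorem sum_snd_map_replace (l : List (Char × Int)) (k : Char) (v w : Int)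
    (hnd : (l.map Prod.fst).Nodup) (hmem : (k, w) ∈ l) :
    ((l.map (fun p => if p.1 == k then (k, v) else p)).map Prod.snd).sum
      = (l.map Prod.snd).sum - w + v := by
  induction l with
  | nil => cases hmem
  | cons a t ih =>
    rw [List.map_cons] at hnd
    have hnd' := List.nodup_cons.mp hnd
    by_cases hk : a.1 = k
    · have hknot : k ∉ t.map Prod.fst := by rw [← hk]; exact hnd'.1
      have haw : a = (k, w) := by
        rcases List.mem_cons.mp hmem with h | h
        · exact h.symm
        · exact absurd (List.mem_map.mpr ⟨(k, w), h, rfl⟩) hknot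
      have hid : t.map (fun p => if p.1 == k then (k, v) else p) = t := by
        have hcongr : ∀ p ∈ t, (if p.1 == k then (k, v) else p) = id p := by
          intro p hp
          have : p.1 ≠ k := fun hEq => hknot (List.mem_map.mpr ⟨p, hp, hEq⟩)
          simp [this]
        rw [List.map_congr_left hcongr, List.map_id]
      simp only [List.map_cons, List.sum_cons, hid, haw]
      simp only [beq_self_eq_true, if_true]
      ring
    · have hmem' : (k, w) ∈ t := by
        rcases List.mem_cons.mp hmem with h | h
        · exact absurd (congrArg Prod.fst h.symm) hk
        · exact h
      simp only [List.map_cons, List.sum_cons]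
      rw [if_neg (by simp [hk]), ih hnd'.2 hmem']
      ring

theorem sum_values_insert_fresh {d : PySem.Dict Char Int} {k : Char} (v : Int)
    (h : d.contains k = false) :
    ((d.insert k v).values).sum = d.values.sum + v := by
  simp [PySem.Dict.values, PySem.Dict.items_insert_of_not_contains d v h]

theorem sum_values_insert_overwrite {d : PySem.Dict Char Int} {k : Char} {w : Int} (v : Int)
    (hnd : d.keys.Nodup) (h : d.get? k = some w) :
    ((d.insert k v).values).sum = d.values.sum - w + v := by
  have hc : d.contains k = true := by
    rw [PySem.Dict.contains_eq_isSome_get?, h]; rfl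
  have hmem : (k, w) ∈ d.items := PySem.Dict.mem_items_of_get?_eq_some d h
  rw [PySem.Dict.values, PySem.Dict.items_insert_of_contains d v hc,
    sum_snd_map_replace d.items k v w hnd hmem]
  rfl

theorem nodupB (l : List Char) :
    (l.foldl stepB PySem.Dict.empty).keys.Nodup := by
  exact PySem.Dict.nodup_keys_foldl_insert l (fun d c => 1 + d.values.sum)
    PySem.Dict.empty PySem.Dict.nodup_keys_empty

theorem invA (s : String) (h : ∀ c ∈ s.toList, c.toNat < 256) (i : Nat)
    (hi : i ≤ s.toList.length) :
    (((PySem.List.pyRange 1 ((i:Int)+1) 1).foldl (stepA s) (Ainit s)).1.length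
        = s.toList.length + 1) ∧
    (((PySem.List.pyRange 1 ((i:Int)+1) 1).foldl (stepA s) (Ainit s)).2.length = 256) ∧
    (((PySem.List.pyRange 1 ((i:Int)+1) 1).foldl (stepA s) (Ainit s)).1.getD i 0
        = 1 + ((s.toList.take i).foldl stepB PySem.Dict.empty).values.sum) ∧
    (∀ c : Char, c.toNat < 256 →
      ((((PySem.List.pyRange 1 ((i:Int)+1) 1).foldl (stepA s) (Ainit s)).2.getD c.toNat (-1) = -1 ∧
        ((s.toList.take i).foldl stepB PySem.Dict.empty).get? c = none) ∨
      (∃ j : Nat, j < i ∧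
        (((PySem.List.pyRange 1 ((i:Int)+1) 1).foldl (stepA s) (Ainit s)).2.getD c.toNat (-1) = (j:Int)) ∧
        ((s.toList.take i).foldl stepB PySem.Dict.empty).get? c
          = some ((((PySem.List.pyRange 1 ((i:Int)+1) 1).foldl (stepA s) (Ainit s)).1.getD j 0))))) := by
  induction i with
  | zero =>
    have h0 : PySem.List.pyRange 1 (((0:Nat):Int)+1) 1 = [] := by
      rw [show (((0:Nat):Int)+1) = 1 by norm_num]
      exact PySem.List.pyRange_one_eq_nil (by norm_num)
    rw [h0]
    simp only [List.foldl_nil, List.take_zero, Ainit]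
    refine ⟨?_, ?_, ?_, ?_⟩
    · rw [List.length_set, List.length_replicate]
    · rw [List.length_replicate]
    · rw [getD_set_self' _ _ _ _ (by rw [List.length_replicate]; omega)]
      simp [PySem.Dict.values, PySem.Dict.empty]
    · intro c hc
      left
      refine ⟨?_, ?_⟩
      · rw [List.getD, List.getElem?_replicate]
        simp [hc]
      · exact PySem.Dict.get?_empty c
  | succ i ih =>
    have hi' : i < s.toList.length := by omega
    obtain ⟨hlen, hllen, hcnt, hinv⟩ := ih (by omega)
    set st := (PySem.List.pyRange 1 ((i:Int)+1) 1).foldl (stepA s) (Ainit s) with hst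
    set bt := (s.toList.take i).foldl stepB PySem.Dict.empty with hbt
    have hbnd : bt.keys.Nodup := nodupB _
    have hsplit : PySem.List.pyRange 1 (((i+1:Nat):Int)+1) 1
        = PySem.List.pyRange 1 ((i:Int)+1) 1 ++ [((i:Int)+1)] := by
      rw [show (((i+1:Nat):Int)+1) = ((i:Int)+1)+1 by push_cast; ring]
      exact PySem.List.pyRange_one_succ_right (by omega)
    rw [hsplit, List.foldl_append,
        List.take_succ_eq_append_getElem hi', List.foldl_append, ← hst, ← hbt]
    simp only [List.foldl_cons, List.foldl_nil]
    set c : Char := s.toList[i] with hcdef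
    have hc : c.toNat < 256 := h _ (List.getElem_mem hi')
    have hidx2 : ((i:Int)+1) = (((i+1:Nat)):Int) := by push_cast; ring
    have hidx1 : ((((i+1:Nat)):Int) - 1) = ((i:Nat):Int) := by push_cast; ring
    have hchar : (PySem.Str.pyGet? s (((i:Nat)):Int)).getD ' ' = c := by
      simp [List.getElem?_eq_getElem hi', hcdef]
    rcases hinv c hc with ⟨hl, hd⟩ | ⟨j, hj, hl, hd⟩
    · -- character not seen before: the subtraction branch is not taken
      have hcontains : bt.contains c = false := by
        rw [PySem.Dict.contains_eq_isSome_get?, hd]; rfl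
      simp only [stepA, stepB, hidx2, hchar, hidx1, hl,
        PySem.List.pySetD_natCast, PySem.List.pyGetD_natCast]
      rw [if_neg (show ¬((-1:Int) ≠ -1) by simp)]
      refine ⟨?_, ?_, ?_, ?_⟩
      · rw [List.length_set, hlen]
      · rw [List.length_set, hllen]
      · rw [getD_set_self' _ _ _ _ (by rw [hlen]; omega),
          sum_values_insert_fresh _ hcontains, hcnt]; ring
      · intro c' hc'
        by_cases hcc : c' = c
        · right
          refine ⟨i, by omega, ?_, ?_⟩
          · rw [hcc]
            exact getD_set_self' _ _ _ _ (by rw [hllen]; exact hc)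
          · rw [hcc, PySem.Dict.get?_insert_self _ _ _,
              getD_set_ne' _ _ _ _ _ (by omega), hcnt]
        · have hne : c'.toNat ≠ c.toNat := fun hEq => hcc (Char.ext (UInt32.toNat_inj.mp hEq))
          rcases hinv c' hc' with ⟨hl', hd'⟩ | ⟨j', hj', hl', hd'⟩
          · left
            exact ⟨by rw [getD_set_ne' _ _ _ _ _ (fun hEq => hne hEq.symm)]; exact hl',
              by rw [PySem.Dict.get?_insert_of_ne _ _ hcc]; exact hd'⟩
          · right
            refine ⟨j', by omega, ?_, ?_⟩
            · rw [getD_set_ne' _ _ _ _ _ (fun hEq => hne hEq.symm)]; exact hl'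
            · rw [PySem.Dict.get?_insert_of_ne _ _ hcc, hd',
                getD_set_ne' _ _ _ _ _ (by omega)]
    · -- character seen before, last occurrence at index j < i
      simp only [stepA, stepB, hidx2, hchar, hidx1, hl,
        PySem.List.pySetD_natCast, PySem.List.pyGetD_natCast]
      rw [if_pos (show ((j:Int)) ≠ -1 by omega)]
      refine ⟨?_, ?_, ?_, ?_⟩
      · rw [List.length_set, List.length_set, hlen]
      · rw [List.length_set, hllen]
      · rw [getD_set_self' _ _ _ _ (by rw [List.length_set, hlen]; omega),
          getD_set_self' _ _ _ _ (by rw [hlen]; omega),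
          getD_set_ne' _ _ _ _ _ (by omega),
          sum_values_insert_overwrite _ hbnd hd, hcnt]
        ring
      · intro c' hc'
        by_cases hcc : c' = c
        · right
          refine ⟨i, by omega, ?_, ?_⟩
          · rw [hcc]
            exact getD_set_self' _ _ _ _ (by rw [hllen]; exact hc)
          · rw [hcc, PySem.Dict.get?_insert_self _ _ _,
              getD_set_ne' _ _ _ _ _ (by omega),
              getD_set_ne' _ _ _ _ _ (by omega), hcnt]
        · have hne : c'.toNat ≠ c.toNat := fun hEq => hcc (Char.ext (UInt32.toNat_inj.mp hEq))
          rcases hinv c' hc' with ⟨hl', hd'⟩ | ⟨j', hj', hl', hd'⟩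
          · left
            exact ⟨by rw [getD_set_ne' _ _ _ _ _ (fun hEq => hne hEq.symm)]; exact hl',
              by rw [PySem.Dict.get?_insert_of_ne _ _ hcc]; exact hd'⟩
          · right
            refine ⟨j', by omega, ?_, ?_⟩
            · rw [getD_set_ne' _ _ _ _ _ (fun hEq => hne hEq.symm)]; exact hl'
            · rw [PySem.Dict.get?_insert_of_ne _ _ hcc, hd',
                getD_set_ne' _ _ _ _ _ (by omega),
                getD_set_ne' _ _ _ _ _ (by omega)]

theorem countSubA_eq (s : String) (h : ∀ c ∈ s.toList, c.toNat < 256) :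
    countSubA s = countSubB s + 2 := by
  obtain ⟨hlen, -, hcnt, -⟩ := invA s h s.toList.length le_rfl
  unfold countSubA countSubB
  rw [List.take_length] at hcnt
  simp only [PySem.Str.len_eq]
  rw [show ((s.toList.length : Int) + 1).toNat = s.toList.length + 1 by omega]
  rw [show PySem.List.pySetD (List.replicate (s.toList.length + 1) (0:Int)) 0 1
      = (List.replicate (s.toList.length + 1) (0:Int)).set 0 1 by
    simpa using PySem.List.pySetD_natCast (List.replicate (s.toList.length + 1) (0:Int)) 0 1]
  rw [show ((List.replicate (s.toList.length + 1) (0:Int)).set 0 1, (List.replicate 256 (-1:Int)))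
      = Ainit s from rfl]
  rw [show PySem.List.pyGetD (((PySem.List.pyRange 1 ((s.toList.length:Int)+1) 1).foldl (stepA s) (Ainit s)).1) ((s.toList.length:Int)) 0
      = ((PySem.List.pyRange 1 ((s.toList.length:Int)+1) 1).foldl (stepA s) (Ainit s)).1.getD s.toList.length 0 from
    PySem.List.pyGetD_natCast _ _ _]
  rw [hcnt]
  ring

theorem betterString_spec' (str1 str2 : String)
    (h1 : ∀ c ∈ str1.toList, c.toNat < 256) (h2 : ∀ c ∈ str2.toList, c.toNat < 256) :
    betterString str1 str2 = betterString_alt str1 str2 := by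
  unfold betterString betterString_alt
  rw [countSubA_eq str1 h1, countSubA_eq str2 h2]
  simp only [beq_iff_eq, ge_iff_le, gt_iff_lt]
  split_ifs <;> first | rfl | omega

-- ===== VERDICT (by name: the statement is the Claim_ definition above) =====
theorem betterString_spec : Claim_equal_betterString := by
  intro str1 str2 hdom
  unfold Dom_betterString at hdom
  simp only [Bool.and_eq_true, pvDomStr, List.all_eq_true] at hdom
  have bound : ∀ (s : String), (∀ c ∈ s.toList, pvDomChar c = true) → ∀ c ∈ s.toList, c.toNat < 256 := by
    intro s hs c hc
    have := hs c hc
    simp [pvDomChar] at this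
    omega
  exact betterString_spec' str1 str2 (bound _ hdom.1) (bound _ hdom.2)
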